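-- pv_equiv track=rewrite | github.com/adidassg11/interview_practice | checkio/roman_numerals.py | get_roman_numeral
-- ===== SOURCE A (Python) =====
-- ROMANS = (('M',  1000),
--           ('CM', 900),
--           ('D',  500),
--           ('CD', 400),
--           ('C',  100),
--           ('XC', 90),
--           ('L',  50),
--           ('XL', 40),
--           ('X',  10),
--           ('IX', 9),
--           ('V',  5),
--           ('IV', 4),
--           ('I',  1))
--
-- def get_roman_numeral(num):
--     ret_rn = ''  # Return roman numeral
--     remainder = 0
--     for roman, arabic in reversed(ROMANS):
--         if num >= arabic:
--             ret_rn = roman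
--             remainder = num - arabic
--             continue
--         break
--
--     return ret_rn, remainder
-- ===== SOURCE B (Python) =====
-- import bisect
--
-- _VALUES = (1, 4, 5, 9, 10, 40, 50, 90, 100, 400, 500, 900, 1000)
-- _ROMANS = ('I', 'IV', 'V', 'IX', 'X', 'XL', 'L', 'XC', 'C', 'CD', 'D', 'CM', 'M')
--
-- def get_roman_numeral(num):
--     i = bisect.bisect_right(_VALUES, num) - 1
--     if i < 0:
--         return '', 0
--     return _ROMANS[i], num - _VALUES[i]
-- ===== Notes on version B (the rewrite author's own statement) =====
-- stated objective: idiomatic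
-- what changed: Replaced A's linear scan over the reversed token table (update-and-break) with bisect.bisect_right binary search on an ascending value list with a parallel roman-string list.
import Mathlib
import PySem

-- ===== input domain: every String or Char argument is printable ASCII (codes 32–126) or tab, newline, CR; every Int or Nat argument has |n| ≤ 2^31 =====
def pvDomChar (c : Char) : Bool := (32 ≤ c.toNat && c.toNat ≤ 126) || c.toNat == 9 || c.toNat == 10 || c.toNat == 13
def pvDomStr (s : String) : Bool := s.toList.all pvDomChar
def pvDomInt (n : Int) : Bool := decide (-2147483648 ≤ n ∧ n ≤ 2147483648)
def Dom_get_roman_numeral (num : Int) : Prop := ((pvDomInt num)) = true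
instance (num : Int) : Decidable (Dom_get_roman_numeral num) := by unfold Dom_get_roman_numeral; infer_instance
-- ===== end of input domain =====

-- B replaces A's linear update-and-break scan by a binary search (bisect_right) on a sorted value list; idiomatic, same results.

-- ===== PORT A =====
def ROMANS : List (String × Int) :=
  [("M", 1000), ("CM", 900), ("D", 500), ("CD", 400), ("C", 100), ("XC", 90),
   ("L", 50), ("XL", 40), ("X", 10), ("IX", 9), ("V", 5), ("IV", 4), ("I", 1)]

-- the for-loop with `continue`/`break`: carries (ret_rn, remainder), stops at the first failing test
def pvLoopA (num : Int) : List (String × Int) → String × Int → String × Int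
  | [], st => st
  | (roman, arabic) :: rest, st =>
      if num ≥ arabic then pvLoopA num rest (roman, num - arabic) else st

def get_roman_numeral (num : Int) : String × Int :=
  pvLoopA num ROMANS.reverse ("", 0)

-- ===== PORT B =====
def pvVALUES : List Int := [1, 4, 5, 9, 10, 40, 50, 90, 100, 400, 500, 900, 1000]
def pvROMANS : List String :=
  ["I", "IV", "V", "IX", "X", "XL", "L", "XC", "C", "CD", "D", "CM", "M"]

-- bisect.bisect_right as in CPython: halve [lo, hi) until empty
def pvBisectRight (vals : List Int) (x : Int) (lo hi : Nat) : Nat :=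
  if _h : lo < hi then
    let mid := (lo + hi) / 2
    if x < vals.getD mid 0 then pvBisectRight vals x lo mid
    else pvBisectRight vals x (mid + 1) hi
  else lo
termination_by hi - lo
decreasing_by all_goals omega

def get_roman_numeral_alt (num : Int) : String × Int :=
  let i : Int := (pvBisectRight pvVALUES num 0 pvVALUES.length : Int) - 1
  if i < 0 then ("", 0)
  else (pvROMANS.getD i.toNat "", num - pvVALUES.getD i.toNat 0)

-- ===== PRECONDITION & SPEC =====
def Spec_get_roman_numeral (num : Int) (out : String × Int) : Prop := out = get_roman_numeral_alt num
instance (num : Int) (out : String × Int) : Decidable (Spec_get_roman_numeral num out) := by unfold Spec_get_roman_numeral; infer_instance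

-- ===== CLAIM (what is proved, stated in full; the proofs are below) =====
def Claim_equal_get_roman_numeral : Prop := ∀ (num : Int), Dom_get_roman_numeral num → Spec_get_roman_numeral num (get_roman_numeral num)

-- ===== LEMMAS AND PROOFS =====

-- ===== VERDICT (by name: the statement is the Claim_ definition above) =====
theorem get_roman_numeral_spec : Claim_equal_get_roman_numeral := by
  intro num _
  unfold Spec_get_roman_numeral get_roman_numeral get_roman_numeral_alt
  by_cases h1000 : (1000:Int) ≤ num
  ·
    have hb : pvBisectRight [1, 4, 5, 9, 10, 40, 50, 90, 100, 400, 500, 900, 1000] num 0 13 = 13 := by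
      rw [pvBisectRight.eq_def]; norm_num [show ¬ num < (50:Int) by omega]
      rw [pvBisectRight.eq_def]; norm_num [show ¬ num < (500:Int) by omega]
      rw [pvBisectRight.eq_def]; norm_num [show ¬ num < (1000:Int) by omega]
      rw [pvBisectRight.eq_def]; norm_num
    norm_num [pvLoopA, ROMANS, pvVALUES, pvROMANS, hb,
      show (1:Int) ≤ num by omega, show (4:Int) ≤ num by omega, show (5:Int) ≤ num by omega, show (9:Int) ≤ num by omega, show (10:Int) ≤ num by omega, show (40:Int) ≤ num by omega, show (50:Int) ≤ num by omega, show (90:Int) ≤ num by omega, show (100:Int) ≤ num by omega, show (400:Int) ≤ num by omega, show (500:Int) ≤ num by omega, show (900:Int) ≤ num by omega, show (1000:Int) ≤ num by omega] <;> decide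
  by_cases h900 : (900:Int) ≤ num
  ·
    have hb : pvBisectRight [1, 4, 5, 9, 10, 40, 50, 90, 100, 400, 500, 900, 1000] num 0 13 = 12 := by
      rw [pvBisectRight.eq_def]; norm_num [show ¬ num < (50:Int) by omega]
      rw [pvBisectRight.eq_def]; norm_num [show ¬ num < (500:Int) by omega]
      rw [pvBisectRight.eq_def]; norm_num [show num < (1000:Int) by omega]
      rw [pvBisectRight.eq_def]; norm_num [show ¬ num < (900:Int) by omega]
      rw [pvBisectRight.eq_def]; norm_num
    norm_num [pvLoopA, ROMANS, pvVALUES, pvROMANS, hb,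
      show (1:Int) ≤ num by omega, show (4:Int) ≤ num by omega, show (5:Int) ≤ num by omega, show (9:Int) ≤ num by omega, show (10:Int) ≤ num by omega, show (40:Int) ≤ num by omega, show (50:Int) ≤ num by omega, show (90:Int) ≤ num by omega, show (100:Int) ≤ num by omega, show (400:Int) ≤ num by omega, show (500:Int) ≤ num by omega, show (900:Int) ≤ num by omega, show ¬ (1000:Int) ≤ num by omega] <;> decide
  by_cases h500 : (500:Int) ≤ num
  ·
    have hb : pvBisectRight [1, 4, 5, 9, 10, 40, 50, 90, 100, 400, 500, 900, 1000] num 0 13 = 11 := by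
      rw [pvBisectRight.eq_def]; norm_num [show ¬ num < (50:Int) by omega]
      rw [pvBisectRight.eq_def]; norm_num [show ¬ num < (500:Int) by omega]
      rw [pvBisectRight.eq_def]; norm_num [show num < (1000:Int) by omega]
      rw [pvBisectRight.eq_def]; norm_num [show num < (900:Int) by omega]
      rw [pvBisectRight.eq_def]; norm_num
    norm_num [pvLoopA, ROMANS, pvVALUES, pvROMANS, hb,
      show (1:Int) ≤ num by omega, show (4:Int) ≤ num by omega, show (5:Int) ≤ num by omega, show (9:Int) ≤ num by omega, show (10:Int) ≤ num by omega, show (40:Int) ≤ num by omega, show (50:Int) ≤ num by omega, show (90:Int) ≤ num by omega, show (100:Int) ≤ num by omega, show (400:Int) ≤ num by omega, show (500:Int) ≤ num by omega, show ¬ (900:Int) ≤ num by omega, show ¬ (1000:Int) ≤ num by omega] <;> decide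
  by_cases h400 : (400:Int) ≤ num
  ·
    have hb : pvBisectRight [1, 4, 5, 9, 10, 40, 50, 90, 100, 400, 500, 900, 1000] num 0 13 = 10 := by
      rw [pvBisectRight.eq_def]; norm_num [show ¬ num < (50:Int) by omega]
      rw [pvBisectRight.eq_def]; norm_num [show num < (500:Int) by omega]
      rw [pvBisectRight.eq_def]; norm_num [show ¬ num < (100:Int) by omega]
      rw [pvBisectRight.eq_def]; norm_num [show ¬ num < (400:Int) by omega]
      rw [pvBisectRight.eq_def]; norm_num
    norm_num [pvLoopA, ROMANS, pvVALUES, pvROMANS, hb,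
      show (1:Int) ≤ num by omega, show (4:Int) ≤ num by omega, show (5:Int) ≤ num by omega, show (9:Int) ≤ num by omega, show (10:Int) ≤ num by omega, show (40:Int) ≤ num by omega, show (50:Int) ≤ num by omega, show (90:Int) ≤ num by omega, show (100:Int) ≤ num by omega, show (400:Int) ≤ num by omega, show ¬ (500:Int) ≤ num by omega, show ¬ (900:Int) ≤ num by omega, show ¬ (1000:Int) ≤ num by omega] <;> decide
  by_cases h100 : (100:Int) ≤ num
  ·
    have hb : pvBisectRight [1, 4, 5, 9, 10, 40, 50, 90, 100, 400, 500, 900, 1000] num 0 13 = 9 := by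
      rw [pvBisectRight.eq_def]; norm_num [show ¬ num < (50:Int) by omega]
      rw [pvBisectRight.eq_def]; norm_num [show num < (500:Int) by omega]
      rw [pvBisectRight.eq_def]; norm_num [show ¬ num < (100:Int) by omega]
      rw [pvBisectRight.eq_def]; norm_num [show num < (400:Int) by omega]
      rw [pvBisectRight.eq_def]; norm_num
    norm_num [pvLoopA, ROMANS, pvVALUES, pvROMANS, hb,
      show (1:Int) ≤ num by omega, show (4:Int) ≤ num by omega, show (5:Int) ≤ num by omega, show (9:Int) ≤ num by omega, show (10:Int) ≤ num by omega, show (40:Int) ≤ num by omega, show (50:Int) ≤ num by omega, show (90:Int) ≤ num by omega, show (100:Int) ≤ num by omega, show ¬ (400:Int) ≤ num by omega, show ¬ (500:Int) ≤ num by omega, show ¬ (900:Int) ≤ num by omega, show ¬ (1000:Int) ≤ num by omega] <;> decide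
  by_cases h90 : (90:Int) ≤ num
  ·
    have hb : pvBisectRight [1, 4, 5, 9, 10, 40, 50, 90, 100, 400, 500, 900, 1000] num 0 13 = 8 := by
      rw [pvBisectRight.eq_def]; norm_num [show ¬ num < (50:Int) by omega]
      rw [pvBisectRight.eq_def]; norm_num [show num < (500:Int) by omega]
      rw [pvBisectRight.eq_def]; norm_num [show num < (100:Int) by omega]
      rw [pvBisectRight.eq_def]; norm_num [show ¬ num < (90:Int) by omega]
      rw [pvBisectRight.eq_def]; norm_num
    norm_num [pvLoopA, ROMANS, pvVALUES, pvROMANS, hb,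
      show (1:Int) ≤ num by omega, show (4:Int) ≤ num by omega, show (5:Int) ≤ num by omega, show (9:Int) ≤ num by omega, show (10:Int) ≤ num by omega, show (40:Int) ≤ num by omega, show (50:Int) ≤ num by omega, show (90:Int) ≤ num by omega, show ¬ (100:Int) ≤ num by omega, show ¬ (400:Int) ≤ num by omega, show ¬ (500:Int) ≤ num by omega, show ¬ (900:Int) ≤ num by omega, show ¬ (1000:Int) ≤ num by omega] <;> decide
  by_cases h50 : (50:Int) ≤ num
  ·
    have hb : pvBisectRight [1, 4, 5, 9, 10, 40, 50, 90, 100, 400, 500, 900, 1000] num 0 13 = 7 := by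
      rw [pvBisectRight.eq_def]; norm_num [show ¬ num < (50:Int) by omega]
      rw [pvBisectRight.eq_def]; norm_num [show num < (500:Int) by omega]
      rw [pvBisectRight.eq_def]; norm_num [show num < (100:Int) by omega]
      rw [pvBisectRight.eq_def]; norm_num [show num < (90:Int) by omega]
      rw [pvBisectRight.eq_def]; norm_num
    norm_num [pvLoopA, ROMANS, pvVALUES, pvROMANS, hb,
      show (1:Int) ≤ num by omega, show (4:Int) ≤ num by omega, show (5:Int) ≤ num by omega, show (9:Int) ≤ num by omega, show (10:Int) ≤ num by omega, show (40:Int) ≤ num by omega, show (50:Int) ≤ num by omega, show ¬ (90:Int) ≤ num by omega, show ¬ (100:Int) ≤ num by omega, show ¬ (400:Int) ≤ num by omega, show ¬ (500:Int) ≤ num by omega, show ¬ (900:Int) ≤ num by omega, show ¬ (1000:Int) ≤ num by omega] <;> decide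
  by_cases h40 : (40:Int) ≤ num
  ·
    have hb : pvBisectRight [1, 4, 5, 9, 10, 40, 50, 90, 100, 400, 500, 900, 1000] num 0 13 = 6 := by
      rw [pvBisectRight.eq_def]; norm_num [show num < (50:Int) by omega]
      rw [pvBisectRight.eq_def]; norm_num [show ¬ num < (9:Int) by omega]
      rw [pvBisectRight.eq_def]; norm_num [show ¬ num < (40:Int) by omega]
      rw [pvBisectRight.eq_def]; norm_num
    norm_num [pvLoopA, ROMANS, pvVALUES, pvROMANS, hb,
      show (1:Int) ≤ num by omega, show (4:Int) ≤ num by omega, show (5:Int) ≤ num by omega, show (9:Int) ≤ num by omega, show (10:Int) ≤ num by omega, show (40:Int) ≤ num by omega, show ¬ (50:Int) ≤ num by omega, show ¬ (90:Int) ≤ num by omega, show ¬ (100:Int) ≤ num by omega, show ¬ (400:Int) ≤ num by omega, show ¬ (500:Int) ≤ num by omega, show ¬ (900:Int) ≤ num by omega, show ¬ (1000:Int) ≤ num by omega] <;> decide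
  by_cases h10 : (10:Int) ≤ num
  ·
    have hb : pvBisectRight [1, 4, 5, 9, 10, 40, 50, 90, 100, 400, 500, 900, 1000] num 0 13 = 5 := by
      rw [pvBisectRight.eq_def]; norm_num [show num < (50:Int) by omega]
      rw [pvBisectRight.eq_def]; norm_num [show ¬ num < (9:Int) by omega]
      rw [pvBisectRight.eq_def]; norm_num [show num < (40:Int) by omega]
      rw [pvBisectRight.eq_def]; norm_num [show ¬ num < (10:Int) by omega]
      rw [pvBisectRight.eq_def]; norm_num
    norm_num [pvLoopA, ROMANS, pvVALUES, pvROMANS, hb,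
      show (1:Int) ≤ num by omega, show (4:Int) ≤ num by omega, show (5:Int) ≤ num by omega, show (9:Int) ≤ num by omega, show (10:Int) ≤ num by omega, show ¬ (40:Int) ≤ num by omega, show ¬ (50:Int) ≤ num by omega, show ¬ (90:Int) ≤ num by omega, show ¬ (100:Int) ≤ num by omega, show ¬ (400:Int) ≤ num by omega, show ¬ (500:Int) ≤ num by omega, show ¬ (900:Int) ≤ num by omega, show ¬ (1000:Int) ≤ num by omega] <;> decide
  by_cases h9 : (9:Int) ≤ num
  ·
    have hb : pvBisectRight [1, 4, 5, 9, 10, 40, 50, 90, 100, 400, 500, 900, 1000] num 0 13 = 4 := by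
      rw [pvBisectRight.eq_def]; norm_num [show num < (50:Int) by omega]
      rw [pvBisectRight.eq_def]; norm_num [show ¬ num < (9:Int) by omega]
      rw [pvBisectRight.eq_def]; norm_num [show num < (40:Int) by omega]
      rw [pvBisectRight.eq_def]; norm_num [show num < (10:Int) by omega]
      rw [pvBisectRight.eq_def]; norm_num
    norm_num [pvLoopA, ROMANS, pvVALUES, pvROMANS, hb,
      show (1:Int) ≤ num by omega, show (4:Int) ≤ num by omega, show (5:Int) ≤ num by omega, show (9:Int) ≤ num by omega, show ¬ (10:Int) ≤ num by omega, show ¬ (40:Int) ≤ num by omega, show ¬ (50:Int) ≤ num by omega, show ¬ (90:Int) ≤ num by omega, show ¬ (100:Int) ≤ num by omega, show ¬ (400:Int) ≤ num by omega, show ¬ (500:Int) ≤ num by omega, show ¬ (900:Int) ≤ num by omega, show ¬ (1000:Int) ≤ num by omega] <;> decide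
  by_cases h5 : (5:Int) ≤ num
  ·
    have hb : pvBisectRight [1, 4, 5, 9, 10, 40, 50, 90, 100, 400, 500, 900, 1000] num 0 13 = 3 := by
      rw [pvBisectRight.eq_def]; norm_num [show num < (50:Int) by omega]
      rw [pvBisectRight.eq_def]; norm_num [show num < (9:Int) by omega]
      rw [pvBisectRight.eq_def]; norm_num [show ¬ num < (4:Int) by omega]
      rw [pvBisectRight.eq_def]; norm_num [show ¬ num < (5:Int) by omega]
      rw [pvBisectRight.eq_def]; norm_num
    norm_num [pvLoopA, ROMANS, pvVALUES, pvROMANS, hb,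
      show (1:Int) ≤ num by omega, show (4:Int) ≤ num by omega, show (5:Int) ≤ num by omega, show ¬ (9:Int) ≤ num by omega, show ¬ (10:Int) ≤ num by omega, show ¬ (40:Int) ≤ num by omega, show ¬ (50:Int) ≤ num by omega, show ¬ (90:Int) ≤ num by omega, show ¬ (100:Int) ≤ num by omega, show ¬ (400:Int) ≤ num by omega, show ¬ (500:Int) ≤ num by omega, show ¬ (900:Int) ≤ num by omega, show ¬ (1000:Int) ≤ num by omega] <;> decide
  by_cases h4 : (4:Int) ≤ num
  ·
    have hb : pvBisectRight [1, 4, 5, 9, 10, 40, 50, 90, 100, 400, 500, 900, 1000] num 0 13 = 2 := by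
      rw [pvBisectRight.eq_def]; norm_num [show num < (50:Int) by omega]
      rw [pvBisectRight.eq_def]; norm_num [show num < (9:Int) by omega]
      rw [pvBisectRight.eq_def]; norm_num [show ¬ num < (4:Int) by omega]
      rw [pvBisectRight.eq_def]; norm_num [show num < (5:Int) by omega]
      rw [pvBisectRight.eq_def]; norm_num
    norm_num [pvLoopA, ROMANS, pvVALUES, pvROMANS, hb,
      show (1:Int) ≤ num by omega, show (4:Int) ≤ num by omega, show ¬ (5:Int) ≤ num by omega, show ¬ (9:Int) ≤ num by omega, show ¬ (10:Int) ≤ num by omega, show ¬ (40:Int) ≤ num by omega, show ¬ (50:Int) ≤ num by omega, show ¬ (90:Int) ≤ num by omega, show ¬ (100:Int) ≤ num by omega, show ¬ (400:Int) ≤ num by omega, show ¬ (500:Int) ≤ num by omega, show ¬ (900:Int) ≤ num by omega, show ¬ (1000:Int) ≤ num by omega] <;> decide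
  by_cases h1 : (1:Int) ≤ num
  ·
    have hb : pvBisectRight [1, 4, 5, 9, 10, 40, 50, 90, 100, 400, 500, 900, 1000] num 0 13 = 1 := by
      rw [pvBisectRight.eq_def]; norm_num [show num < (50:Int) by omega]
      rw [pvBisectRight.eq_def]; norm_num [show num < (9:Int) by omega]
      rw [pvBisectRight.eq_def]; norm_num [show num < (4:Int) by omega]
      rw [pvBisectRight.eq_def]; norm_num [show ¬ num < (1:Int) by omega]
      rw [pvBisectRight.eq_def]; norm_num
    norm_num [pvLoopA, ROMANS, pvVALUES, pvROMANS, hb,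
      show (1:Int) ≤ num by omega, show ¬ (4:Int) ≤ num by omega, show ¬ (5:Int) ≤ num by omega, show ¬ (9:Int) ≤ num by omega, show ¬ (10:Int) ≤ num by omega, show ¬ (40:Int) ≤ num by omega, show ¬ (50:Int) ≤ num by omega, show ¬ (90:Int) ≤ num by omega, show ¬ (100:Int) ≤ num by omega, show ¬ (400:Int) ≤ num by omega, show ¬ (500:Int) ≤ num by omega, show ¬ (900:Int) ≤ num by omega, show ¬ (1000:Int) ≤ num by omega] <;> decide
  have hb : pvBisectRight [1, 4, 5, 9, 10, 40, 50, 90, 100, 400, 500, 900, 1000] num 0 13 = 0 := by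
    rw [pvBisectRight.eq_def]; norm_num [show num < (50:Int) by omega]
    rw [pvBisectRight.eq_def]; norm_num [show num < (9:Int) by omega]
    rw [pvBisectRight.eq_def]; norm_num [show num < (4:Int) by omega]
    rw [pvBisectRight.eq_def]; norm_num [show num < (1:Int) by omega]
    rw [pvBisectRight.eq_def]; norm_num
  norm_num [pvLoopA, ROMANS, pvVALUES, pvROMANS, hb,
    show ¬ (1:Int) ≤ num by omega, show ¬ (4:Int) ≤ num by omega, show ¬ (5:Int) ≤ num by omega, show ¬ (9:Int) ≤ num by omega, show ¬ (10:Int) ≤ num by omega, show ¬ (40:Int) ≤ num by omega, show ¬ (50:Int) ≤ num by omega, show ¬ (90:Int) ≤ num by omega, show ¬ (100:Int) ≤ num by omega, show ¬ (400:Int) ≤ num by omega, show ¬ (500:Int) ≤ num by omega, show ¬ (900:Int) ≤ num by omega, show ¬ (1000:Int) ≤ num by omega] <;> decide
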